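-- pv_equiv track=rewrite | github.com/ashmittomar/Projects | TypingSpeedTest/main.py | mistake
-- ===== SOURCE A (Python) =====
-- def mistake(paragraph, user_input):
--     error = 0
--     for i in range(len(paragraph)):
--         try:
--             if paragraph[i] != user_input[i]:
--                 error += 1
--         except:
--             error += 1
--     return error
-- ===== SOURCE B (Python) =====
-- def _diff(p, u):
--     # p and u have equal length: divide and conquer, short-circuiting when
--     # the aligned chunks are identical (string equality is one C-level check).
--     if p == u:
--         return 0
--     if len(p) <= 1:
--         return 1
--     m = len(p) // 2
--     return _diff(p[:m], u[:m]) + _diff(p[m:], u[m:])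
--
-- def mistake(paragraph, user_input):
--     n = min(len(paragraph), len(user_input))
--     return len(paragraph) - n + _diff(paragraph[:n], user_input[:n])
-- ===== Notes on version B (the rewrite author's own statement) =====
-- stated objective: alternative
-- what changed: Replaced A's flat index loop with per-iteration try/except by a divide-and-conquer diff: positions of paragraph past the end of user_input are counted arithmetically, and mismatches in the overlap are counted by recursive halving that returns 0 immediately whenever the two aligned chunks compare equal.
import Mathlib
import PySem

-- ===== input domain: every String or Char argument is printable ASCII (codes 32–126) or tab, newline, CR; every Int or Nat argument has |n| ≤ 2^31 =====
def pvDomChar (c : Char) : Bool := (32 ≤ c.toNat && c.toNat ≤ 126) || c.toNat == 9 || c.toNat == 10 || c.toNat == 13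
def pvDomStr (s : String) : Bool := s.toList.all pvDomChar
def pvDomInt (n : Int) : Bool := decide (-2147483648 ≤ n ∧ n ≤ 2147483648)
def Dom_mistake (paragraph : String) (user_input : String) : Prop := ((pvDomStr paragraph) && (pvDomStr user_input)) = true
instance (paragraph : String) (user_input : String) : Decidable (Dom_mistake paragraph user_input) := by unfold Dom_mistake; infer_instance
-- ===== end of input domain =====

-- B replaces A's try/except index loop by a divide-and-conquer diff over the overlap
-- (equal chunks dismissed by one comparison) plus an arithmetic count for the missing tail.

-- ===== PORT A =====
-- A: for i in range(len(paragraph)): try paragraph[i] != user_input[i]; except: error += 1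
def mistake (paragraph : String) (user_input : String) : Int :=
  (PySem.List.pyRange 0 (PySem.Str.len paragraph) 1).foldl
    (fun error i =>
      match PySem.Str.pyGet? paragraph i, PySem.Str.pyGet? user_input i with
      | some a, some b => if a ≠ b then error + 1 else error
      | _, _ => error + 1)
    0

-- ===== PORT B =====
-- _diff(p, u): equal-length slices, recursive halving; strings are carried as their
-- character lists (exact: Python string slicing/equality = list slicing/equality here).
def diffCount (p : List Char) (u : List Char) : Int :=
  if p = u then 0
  else if p.length ≤ 1 then 1
  else
    let m := p.length / 2
    diffCount (p.take m) (u.take m) + diffCount (p.drop m) (u.drop m)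
termination_by p.length
decreasing_by
  · simp only [List.length_take]; omega
  · simp only [List.length_drop]; omega

-- B: n = min(len(p), len(u)); len(p) - n + _diff(p[:n], u[:n])
def mistake_alt (paragraph : String) (user_input : String) : Int :=
  let p := paragraph.toList
  let u := user_input.toList
  let n := min p.length u.length
  (p.length : Int) - (n : Int) + diffCount (p.take n) (u.take n)

-- ===== PRECONDITION & SPEC =====
def Spec_mistake (paragraph : String) (user_input : String) (out : Int) : Prop := out = mistake_alt paragraph user_input
instance (paragraph : String) (user_input : String) (out : Int) : Decidable (Spec_mistake paragraph user_input out) := by unfold Spec_mistake; infer_instance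

-- ===== CLAIM (what is proved, stated in full; the proofs are below) =====
def Claim_equal_mistake : Prop := ∀ (paragraph : String) (user_input : String), Dom_mistake paragraph user_input → Spec_mistake paragraph user_input (mistake paragraph user_input)

-- ===== LEMMAS AND PROOFS =====

-- A's loop, reduced to a fold over List.range on the list side, equals
-- mismatch count over the zip plus the missing-tail count.
theorem mistake_range_eq (p u : List Char) (acc : Int) :
    (List.range p.length).foldl
      (fun error k =>
        match p[k]?, u[k]? with
        | some a, some b => if a ≠ b then error + 1 else error
        | _, _ => error + 1) acc
    = acc + ((p.zip u).countP (fun ab => ab.1 ≠ ab.2) : Int)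
        + max 0 ((p.length : Int) - (u.length : Int)) := by
  induction p generalizing u acc with
  | nil => simp
  | cons c p ih =>
    simp only [List.length_cons]
    rw [List.range_succ_eq_map, List.foldl_cons, List.foldl_map]
    cases u with
    | nil =>
      simp only [List.getElem?_nil, List.getElem?_cons_zero, List.getElem?_cons_succ]
      have h := ih [] (acc + 1)
      simp only [List.getElem?_nil] at h
      rw [h]
      simp
      omega
    | cons d u =>
      simp only [List.getElem?_cons_zero, List.getElem?_cons_succ]
      rw [ih]
      by_cases h : c = d
      · simp [h]
      · simp [h]
        omega

theorem countP_zip_self (p : List Char) :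
    (p.zip p).countP (fun ab => ab.1 ≠ ab.2) = 0 := by
  induction p with
  | nil => simp
  | cons c p ih =>
    simp only [List.zip_cons_cons, List.countP_cons, ih]
    simp

-- zip only looks at the first min-length characters of each list.
theorem zip_take_min (p u : List Char) :
    (p.take (min p.length u.length)).zip (u.take (min p.length u.length)) = p.zip u := by
  induction p generalizing u with
  | nil => simp
  | cons a p ih =>
    cases u with
    | nil => simp
    | cons b u =>
      simp only [List.length_cons, Nat.succ_min_succ, List.take_succ_cons,
        List.zip_cons_cons, ih]

-- B's divide-and-conquer diff equals the mismatch count over the zip (equal lengths).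
theorem diffCount_eq (p u : List Char) (h : p.length = u.length) :
    diffCount p u = ((p.zip u).countP (fun ab => ab.1 ≠ ab.2) : Int) := by
  induction p, u using diffCount.induct with
  | case1 u =>
    rw [diffCount]
    have h0 := countP_zip_self u
    simp only [ne_eq, decide_not] at h0
    simp [h0]
  | case2 p u hne hlen =>
    rw [diffCount]
    simp only [if_neg hne, if_pos hlen]
    match p, u with
    | [], [] => exact absurd rfl hne
    | [], _ :: _ => simp at h
    | _ :: _, [] => simp at h
    | [a], [b] =>
      have hab : a ≠ b := fun hab => hne (by rw [hab])
      simp [hab]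
    | [_], _ :: _ :: _ => simp at h
    | _ :: _ :: _, _ => simp at hlen
  | case3 p u hne hlen m ih1 ih2 =>
    rw [diffCount]
    simp only [if_neg hne, if_neg hlen]
    have hm : p.length / 2 ≤ u.length := by omega
    have hz : p.zip u = (p.take (p.length / 2)).zip (u.take (p.length / 2))
        ++ (p.drop (p.length / 2)).zip (u.drop (p.length / 2)) := by
      rw [← List.zip_append (by simp; omega), List.take_append_drop, List.take_append_drop]
    rw [ih1 (by simp; omega), ih2 (by simp; omega), hz, List.countP_append]
    push_cast
    ring

-- ===== VERDICT (by name: the statement is the Claim_ definition above) =====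
theorem mistake_spec : Claim_equal_mistake := by
  intro ps us _
  unfold Spec_mistake mistake mistake_alt
  rw [PySem.List.pyRange_one]
  simp only [PySem.Str.len_eq, Int.sub_zero, Int.toNat_natCast, List.foldl_map,
    Int.zero_add, PySem.Str.pyGet?_natCast]
  set p := ps.toList
  set u := us.toList
  set n := min p.length u.length with hn
  have hzip : (p.take n).zip (u.take n) = p.zip u := zip_take_min p u
  rw [mistake_range_eq p u 0, diffCount_eq _ _ (by simp [hn]), hzip]
  have : max 0 ((p.length : Int) - (u.length : Int)) = (p.length : Int) - (n : Int) := by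
    simp [hn]; omega
  omega
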